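-- pv_equiv track=rewrite | github.com/fezzle/thinlisp | thinlisp/treebuilder.py | make_identifier
-- ===== SOURCE A (Python) =====
-- def make_identifier(str):
--     for char, replace_str in [
--             ('-', 'SUBTRACT'),
--             ('+', 'ADD'),
--             ('=', 'EQUALS'),
--             ('/', 'DIVIDE'),
--             ('*', 'MULTIPLY')]:
--         if str == char:
--             str = replace_str
--     return str.upper(
--         ).replace('*', '__STAR__'
--         ).replace('<', '__GREATER_THAN__'
--         ).replace('>', '__LESS_THAN__'
--         ).replace('?', '__QUESTION_MARK__'
--         ).replace('-', '__'
--         ).replace('/', '__FORWARD_SLASH__'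
--         ).replace('+', '__PLUS__'
--         )
-- ===== SOURCE B (Python) =====
-- def make_identifier(str):
--     remap = {'-': 'SUBTRACT', '+': 'ADD', '=': 'EQUALS', '/': 'DIVIDE', '*': 'MULTIPLY'}
--     if str in remap:
--         str = remap[str]
--     table = {'*': '__STAR__', '<': '__GREATER_THAN__', '>': '__LESS_THAN__',
--              '?': '__QUESTION_MARK__', '-': '__', '/': '__FORWARD_SLASH__', '+': '__PLUS__'}
--     return ''.join(table.get(c, c) for c in str.upper())
-- ===== Notes on version B (the rewrite author's own statement) =====
-- stated objective: alternative
-- what changed: The sequential five-way == fold becomes a dict lookup, and the seven chained full-string .replace passes become a single traversal that expands each character through a lookup table (valid because no expansion contains a character a later replace targets).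
import Mathlib
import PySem

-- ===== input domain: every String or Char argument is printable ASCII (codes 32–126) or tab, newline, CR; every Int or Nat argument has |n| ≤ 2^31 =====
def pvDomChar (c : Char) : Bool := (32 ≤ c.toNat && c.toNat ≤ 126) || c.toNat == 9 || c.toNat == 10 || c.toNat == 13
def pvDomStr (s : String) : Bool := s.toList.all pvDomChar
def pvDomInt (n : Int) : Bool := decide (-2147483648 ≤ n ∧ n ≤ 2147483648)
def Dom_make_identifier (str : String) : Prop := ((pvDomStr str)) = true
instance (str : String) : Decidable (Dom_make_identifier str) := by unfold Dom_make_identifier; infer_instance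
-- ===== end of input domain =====

-- B replaces the sequential five-way == fold by a dict lookup and the seven chained
-- full-string .replace passes by one traversal expanding each character through a table.


-- ===== PORT A =====
def make_identifier (str : String) : String :=
  let str := [("-", "SUBTRACT"), ("+", "ADD"), ("=", "EQUALS"),
              ("/", "DIVIDE"), ("*", "MULTIPLY")].foldl
    (fun s p => if s == p.1 then p.2 else s) str
  PySem.Str.replace (PySem.Str.replace (PySem.Str.replace (PySem.Str.replace
    (PySem.Str.replace (PySem.Str.replace (PySem.Str.replace
      (PySem.Str.upper str)
      "*" "__STAR__")
      "<" "__GREATER_THAN__")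
      ">" "__LESS_THAN__")
      "?" "__QUESTION_MARK__")
      "-" "__")
      "/" "__FORWARD_SLASH__")
      "+" "__PLUS__"

-- ===== PORT B =====
def make_identifier_alt (str : String) : String :=
  let remap : PySem.Dict String String :=
    PySem.Dict.ofList [("-", "SUBTRACT"), ("+", "ADD"), ("=", "EQUALS"),
                       ("/", "DIVIDE"), ("*", "MULTIPLY")]
  let str := remap.getD str str
  let table : PySem.Dict Char String :=
    PySem.Dict.ofList [('*', "__STAR__"), ('<', "__GREATER_THAN__"), ('>', "__LESS_THAN__"),
                       ('?', "__QUESTION_MARK__"), ('-', "__"), ('/', "__FORWARD_SLASH__"),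
                       ('+', "__PLUS__")]
  PySem.Str.join "" ((PySem.Str.upper str).toList.map (fun c => table.getD c (String.ofList [c])))

-- ===== PRECONDITION & SPEC =====
def Spec_make_identifier (str : String) (out : String) : Prop := out = make_identifier_alt str
instance (str : String) (out : String) : Decidable (Spec_make_identifier str out) := by unfold Spec_make_identifier; infer_instance

-- ===== CLAIM (what is proved, stated in full; the proofs are below) =====
def Claim_equal_make_identifier : Prop := ∀ (str : String), Dom_make_identifier str → Spec_make_identifier str (make_identifier str)

-- ===== LEMMAS AND PROOFS =====

-- single-character replace is a per-character expansion
theorem replace_go_single (c : Char) (new : List Char) :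
    ∀ (l : List Char) (fuel : Nat) (acc : List Char), l.length ≤ fuel →
      PySem.Chars.replace.go [c] new fuel l acc =
        acc.reverse ++ l.flatMap (fun x => if x == c then new else [x]) := by
  intro l
  induction l with
  | nil => intro fuel acc _; cases fuel <;> simp [PySem.Chars.replace.go]
  | cons x t ih =>
    intro fuel acc h
    cases fuel with
    | zero => simp at h
    | succ n =>
      simp only [PySem.Chars.replace.go, List.isPrefixOf]
      by_cases hc : c = x
      · subst hc
        simp only [BEq.rfl, Bool.true_and, if_pos]
        rw [show List.drop [c].length (c :: t) = t from rfl]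
        rw [ih n (new.reverse ++ acc) (by simpa using h)]
        simp [List.flatMap_cons]
      · have hb : (c == x) = false := by simp [hc]
        have hb' : (x == c) = false := by simp [Ne.symm hc]
        simp only [hb, Bool.false_and, if_neg, Bool.false_eq_true, not_false_iff]
        rw [ih n (x :: acc) (by simpa using Nat.le_of_succ_le_succ h)]
        have hxc : ¬ x = c := fun hh => hc hh.symm
        simp [List.flatMap_cons, hxc]

theorem replace_single (c : Char) (new s : List Char) :
    PySem.Chars.replace s [c] new =
      s.flatMap (fun x => if x == c then new else [x]) := by
  rw [show PySem.Chars.replace s [c] new = PySem.Chars.replace.go [c] new s.length s [] from rfl]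
  rw [replace_go_single c new s s.length [] le_rfl]
  simp

-- joining on the empty separator is concatenation
theorem join_empty_sep : ∀ (l : List (List Char)), PySem.Chars.join [] l = l.flatten := by
  intro l
  induction l with
  | nil => simp [PySem.Chars.join_nil]
  | cons p rest ih =>
    cases rest with
    | nil => simp [PySem.Chars.join, List.intercalate]
    | cons q r => rw [PySem.Chars.join_cons_cons]; simp_all

-- the combined per-character expansion both sides compute
def tbl (c : Char) : List Char :=
  if c = '*' then "__STAR__".toList
  else if c = '<' then "__GREATER_THAN__".toList
  else if c = '>' then "__LESS_THAN__".toList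
  else if c = '?' then "__QUESTION_MARK__".toList
  else if c = '-' then "__".toList
  else if c = '/' then "__FORWARD_SLASH__".toList
  else if c = '+' then "__PLUS__".toList
  else [c]

theorem b_elem_eq_tbl (c : Char) :
    ((PySem.Dict.ofList [('*', "__STAR__"), ('<', "__GREATER_THAN__"), ('>', "__LESS_THAN__"),
        ('?', "__QUESTION_MARK__"), ('-', "__"), ('/', "__FORWARD_SLASH__"),
        ('+', "__PLUS__")] : PySem.Dict Char String).getD c (String.ofList [c])).toList = tbl c := by
  by_cases h1 : c = '*'; · subst h1; decide
  by_cases h2 : c = '<'; · subst h2; decide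
  by_cases h3 : c = '>'; · subst h3; decide
  by_cases h4 : c = '?'; · subst h4; decide
  by_cases h5 : c = '-'; · subst h5; decide
  by_cases h6 : c = '/'; · subst h6; decide
  by_cases h7 : c = '+'; · subst h7; decide
  rw [PySem.Dict.getD_of_not_contains]
  · simp [tbl, h1, h2, h3, h4, h5, h6, h7]
  · simp only [PySem.Dict.ofList, PySem.Dict.update, List.foldl_cons, List.foldl_nil,
      PySem.Dict.contains_insert, PySem.Dict.contains_empty]
    simp [h1, h2, h3, h4, h5, h6, h7]

-- the seven-deep replace chain is the flatMap of tbl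
theorem chain_eq_flatMap (s : List Char) :
    PySem.Chars.replace (PySem.Chars.replace (PySem.Chars.replace (PySem.Chars.replace
      (PySem.Chars.replace (PySem.Chars.replace (PySem.Chars.replace
        s ['*'] "__STAR__".toList) ['<'] "__GREATER_THAN__".toList)
        ['>'] "__LESS_THAN__".toList) ['?'] "__QUESTION_MARK__".toList)
        ['-'] "__".toList) ['/'] "__FORWARD_SLASH__".toList)
        ['+'] "__PLUS__".toList
    = s.flatMap tbl := by
  simp only [replace_single, List.flatMap_assoc]
  apply List.flatMap_congr
  intro c _
  by_cases h1 : c = '*'; · subst h1; decide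
  by_cases h2 : c = '<'; · subst h2; decide
  by_cases h3 : c = '>'; · subst h3; decide
  by_cases h4 : c = '?'; · subst h4; decide
  by_cases h5 : c = '-'; · subst h5; decide
  by_cases h6 : c = '/'; · subst h6; decide
  by_cases h7 : c = '+'; · subst h7; decide
  simp [tbl, h1, h2, h3, h4, h5, h6, h7, beq_iff_eq]

-- the sequential == fold of A is B's first-match dict lookup
theorem remap_eq (s : String) :
    [("-", "SUBTRACT"), ("+", "ADD"), ("=", "EQUALS"),
     ("/", "DIVIDE"), ("*", "MULTIPLY")].foldl
      (fun t p => if t == p.1 then p.2 else t) s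
    = (PySem.Dict.ofList [("-", "SUBTRACT"), ("+", "ADD"), ("=", "EQUALS"),
        ("/", "DIVIDE"), ("*", "MULTIPLY")] : PySem.Dict String String).getD s s := by
  by_cases h1 : s = "-"; · subst h1; decide
  by_cases h2 : s = "+"; · subst h2; decide
  by_cases h3 : s = "="; · subst h3; decide
  by_cases h4 : s = "/"; · subst h4; decide
  by_cases h5 : s = "*"; · subst h5; decide
  rw [PySem.Dict.getD_of_not_contains]
  · simp [List.foldl, h1, h2, h3, h4, h5, beq_iff_eq]
  · simp only [PySem.Dict.ofList, PySem.Dict.update, List.foldl_cons, List.foldl_nil,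
      PySem.Dict.contains_insert, PySem.Dict.contains_empty]
    simp [h1, h2, h3, h4, h5]

-- ===== VERDICT (by name: the statement is the Claim_ definition above) =====
theorem make_identifier_spec : Claim_equal_make_identifier := by
  intro str _
  unfold Spec_make_identifier make_identifier make_identifier_alt
  rw [remap_eq]
  set s1 := (PySem.Dict.ofList [("-", "SUBTRACT"), ("+", "ADD"), ("=", "EQUALS"),
      ("/", "DIVIDE"), ("*", "MULTIPLY")] : PySem.Dict String String).getD str str
  apply String.toList_inj.mp
  rw [PySem.Str.toList_join]
  simp only [PySem.Str.toList_replace]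
  rw [show ("*" : String).toList = ['*'] from rfl,
      show ("<" : String).toList = ['<'] from rfl,
      show (">" : String).toList = ['>'] from rfl,
      show ("?" : String).toList = ['?'] from rfl,
      show ("-" : String).toList = ['-'] from rfl,
      show ("/" : String).toList = ['/'] from rfl,
      show ("+" : String).toList = ['+'] from rfl]
  rw [chain_eq_flatMap]
  rw [show ("" : String).toList = ([] : List Char) from rfl, join_empty_sep]
  rw [List.map_map, List.flatten_eq_flatMap, List.flatMap_map]
  apply List.flatMap_congr
  intro c _
  exact (b_elem_eq_tbl c).symm
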